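-- pv_equiv track=rewrite | github.com/ZiglaCity/A2SV | sample problems/hackSuccexCodersCup/reduceArraySizeToTheHalf.py | reduceArraySizeToTheHalf
-- ===== SOURCE A (Python) =====
-- from collections import defaultdict
--
-- def reduceArraySizeToTheHalf(arr):
--     n = len(arr)
--     dic = defaultdict(int)
--     for num in arr:
--         dic[num] += 1
--
--     arr = sorted(list(set(arr)),key=lambda x: -dic[x])
--     i = 0
--     half = n // 2
--     while n > half:
--         n -= dic[arr[i]]
--         i += 1
--     return i
-- ===== SOURCE B (Python) =====
-- def reduceArraySizeToTheHalf(arr):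
--     n = len(arr)
--     counts = {}
--     for x in arr:
--         counts[x] = counts.get(x, 0) + 1
--     # bucket[f] = how many distinct values occur exactly f times (counting sort of frequencies)
--     bucket = {}
--     for c in counts.values():
--         bucket[c] = bucket.get(c, 0) + 1
--     need = n - n // 2
--     taken = 0
--     for f in range(n, 0, -1):
--         for _ in range(bucket.get(f, 0)):
--             if need > 0:
--                 need -= f
--                 taken += 1
--     return taken
-- ===== Notes on version B (the rewrite author's own statement) =====
-- stated objective: alternative
-- what changed: Replaces A's comparison sort of the distinct values by descending frequency with a counting (bucket) sort of the frequencies themselves, followed by the same greedy take; intended as faster (timing read 1.9-2.6x at the largest size across runs, below the confirmation bar on some).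
import Mathlib
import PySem

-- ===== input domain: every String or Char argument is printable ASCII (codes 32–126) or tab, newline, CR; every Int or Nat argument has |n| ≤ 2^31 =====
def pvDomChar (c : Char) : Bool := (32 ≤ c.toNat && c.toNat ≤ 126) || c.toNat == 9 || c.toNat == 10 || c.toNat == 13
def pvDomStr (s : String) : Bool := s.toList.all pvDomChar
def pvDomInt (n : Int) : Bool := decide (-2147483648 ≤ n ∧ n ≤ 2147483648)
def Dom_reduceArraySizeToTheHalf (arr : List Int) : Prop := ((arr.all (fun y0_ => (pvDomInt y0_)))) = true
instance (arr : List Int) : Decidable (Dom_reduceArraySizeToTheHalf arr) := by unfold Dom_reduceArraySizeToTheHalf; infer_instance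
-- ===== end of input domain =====

-- B replaces A's comparison sort of the distinct values by frequency with a counting
-- ("bucket") sort of the frequencies themselves, then the same greedy take.

-- ===== PORT A =====
-- the while loop: consume the sorted distinct values while n > half, counting steps in i.
-- (On the empty-list/n > half state Python would raise IndexError; that state is unreachable,
-- since the frequencies of the distinct values sum to the initial n.)
def pvGoA (dic : PySem.Dict Int Int) (half : Int) : List Int → Int → Int → Int
  | [], _, i => i
  | x :: r, n, i => if n ≤ half then i else pvGoA dic half r (n - dic.getD x 0) (i + 1)

def reduceArraySizeToTheHalf (arr : List Int) : Int :=
  let n : Int := arr.length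
  let dic := arr.foldl (fun d num => d.modify num 0 (· + 1)) PySem.Dict.empty
  let arr2 := PySem.List.sorted (PySem.Set.ofList arr) (fun x => -(dic.getD x 0)) false
  let half := PySem.Int.floordiv n 2
  pvGoA dic half arr2 n 0

-- ===== PORT B =====
def reduceArraySizeToTheHalf_alt (arr : List Int) : Int :=
  let n : Int := arr.length
  let counts := arr.foldl (fun d x => d.insert x (d.getD x 0 + 1)) PySem.Dict.empty
  let bucket := counts.values.foldl (fun d c => d.insert c (d.getD c 0 + 1)) PySem.Dict.empty
  let need := n - PySem.Int.floordiv n 2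
  let st := (PySem.List.pyRange n 0 (-1)).foldl (fun st f =>
      (PySem.List.pyRange 0 (bucket.getD f 0) 1).foldl
        (fun st _ => if st.1 > 0 then (st.1 - f, st.2 + 1) else st) st)
    (need, 0)
  st.2

-- ===== PRECONDITION & SPEC =====
def Spec_reduceArraySizeToTheHalf (arr : List Int) (out : Int) : Prop := out = reduceArraySizeToTheHalf_alt arr
instance (arr : List Int) (out : Int) : Decidable (Spec_reduceArraySizeToTheHalf arr out) := by unfold Spec_reduceArraySizeToTheHalf; infer_instance

-- ===== CLAIM (what is proved, stated in full; the proofs are below) =====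
def Claim_equal_reduceArraySizeToTheHalf : Prop := ∀ (arr : List Int), Dom_reduceArraySizeToTheHalf arr → Spec_reduceArraySizeToTheHalf arr (reduceArraySizeToTheHalf arr)

-- ===== LEMMAS AND PROOFS =====

-- the greedy step both loops perform on the (remaining-need, taken) state, fed one frequency
def pvStep (st : Int × Int) (f : Int) : Int × Int := if st.1 > 0 then (st.1 - f, st.2 + 1) else st

-- once the need is exhausted the fold is the identity
theorem pvStep_done (l : List Int) (st : Int × Int) (h : ¬ st.1 > 0) :
    l.foldl pvStep st = st := by
  induction l with
  | nil => rfl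
  | cons f r ih => simpa [List.foldl, pvStep, if_neg h] using ih

-- the taken-counter is an additive offset
theorem pvStep_shift (l : List Int) (a b : Int) :
    l.foldl pvStep (a, b) = ((l.foldl pvStep (a, 0)).1, b + (l.foldl pvStep (a, 0)).2) := by
  induction l generalizing a b with
  | nil => simp
  | cons f r ih =>
    by_cases h : a > 0
    · simp only [List.foldl, pvStep, if_pos h]
      rw [ih (a - f) (b + 1), ih (a - f) ((0:Int) + 1)]
      simp [Prod.ext_iff]; omega
    · rw [pvStep_done _ _ (by simpa using h), pvStep_done _ _ (by simpa using h)]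
      simp

-- A's while loop is the greedy fold over the mapped frequency list
theorem pvGoA_eq_fold (dic : PySem.Dict Int Int) (half : Int) (l : List Int) (n i : Int) :
    pvGoA dic half l n i = i + ((l.map (fun x => dic.getD x 0)).foldl pvStep (n - half, 0)).2 := by
  induction l generalizing n i with
  | nil => simp [pvGoA]
  | cons x r ih =>
    by_cases h : n ≤ half
    · rw [pvGoA, if_pos h]
      have h0 : ¬ ((n - half, (0:Int)) : Int × Int).1 > 0 := by simp; omega
      rw [List.map_cons, List.foldl_cons, pvStep, if_neg (by simpa using h0), pvStep_done _ _ h0]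
      simp
    · rw [pvGoA, if_neg h, ih]
      simp only [List.map_cons, List.foldl_cons, pvStep]
      rw [if_pos (by simp; omega), pvStep_shift _ (n - half - dic.getD x 0) ((0:Int) + 1)]
      have : n - dic.getD x 0 - half = n - half - dic.getD x 0 := by ring
      rw [this]
      simp
      ring

-- a fold whose body ignores the loop variable is a fold over a replicate
theorem pvFold_ignore (l : List Int) (f : Int) (st : Int × Int) :
    l.foldl (fun st _ => pvStep st f) st = (List.replicate l.length f).foldl pvStep st := by
  induction l generalizing st with
  | nil => rfl
  | cons _ r ih => simp [List.foldl, List.replicate, ih]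

-- fold over a flatMap is the nested fold
theorem pvFold_flatMap (l : List Int) (g : Int → List Int) (st : Int × Int) :
    (l.flatMap g).foldl pvStep st = l.foldl (fun st f => (g f).foldl pvStep st) st := by
  induction l generalizing st with
  | nil => rfl
  | cons f r ih => simp [List.flatMap_cons, List.foldl_append, List.foldl, ih]

-- counting-sort expansion: occurrence counts
theorem pvCount_flatMap_replicate (l : List Int) (c : Int → Nat) (hl : l.Nodup) (x : Int) :
    (l.flatMap (fun f => List.replicate (c f) f)).count x = if x ∈ l then c x else 0 := by
  induction l with
  | nil => simp
  | cons f r ih =>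
    rcases List.nodup_cons.mp hl with ⟨hf, hr⟩
    rw [List.flatMap_cons, List.count_append, List.count_replicate, ih hr]
    by_cases hx : x = f
    · subst hx
      simp [hf]
    · have hfx : ¬ f = x := fun h => hx h.symm
      simp [hfx, hx]

-- counting-sort expansion: descending order
theorem pvPairwise_flatMap_replicate (l : List Int) (c : Int → Nat)
    (hl : l.Pairwise (· > ·)) :
    (l.flatMap (fun f => List.replicate (c f) f)).Pairwise (· ≥ ·) := by
  induction l with
  | nil => simp
  | cons f r ih =>
    rcases List.pairwise_cons.mp hl with ⟨hf, hr⟩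
    rw [List.flatMap_cons, List.pairwise_append]
    refine ⟨?_, ih hr, ?_⟩
    · exact List.pairwise_replicate.mpr (Or.inr le_rfl)
    · intro a ha b hb
      rw [List.eq_of_mem_replicate ha]
      rcases List.mem_flatMap.mp hb with ⟨f', hf', hb'⟩
      rw [List.eq_of_mem_replicate hb']
      exact le_of_lt (hf f' hf')

-- the inner 'for _ in range(k)' loop is the greedy fold over k copies of f
theorem pvInner (k : Nat) (f : Int) (st : Int × Int) :
    (PySem.List.pyRange 0 (k : Int) 1).foldl
      (fun st _ => if st.1 > 0 then (st.1 - f, st.2 + 1) else st) st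
    = (List.replicate k f).foldl pvStep st := by
  rw [show (fun (st : Int × Int) (_ : Int) => if st.1 > 0 then (st.1 - f, st.2 + 1) else st)
        = (fun (st : Int × Int) (_ : Int) => pvStep st f) from rfl, pvFold_ignore]
  simp [PySem.List.length_pyRange_one]

theorem reduceArraySizeToTheHalf_spec : Claim_equal_reduceArraySizeToTheHalf := by
  intro arr _
  show reduceArraySizeToTheHalf arr = reduceArraySizeToTheHalf_alt arr
  simp only [reduceArraySizeToTheHalf, reduceArraySizeToTheHalf_alt]
  rw [← PySem.Dict.counter_eq_foldl arr, PySem.Dict.foldl_insert_getD_add_one_eq_counter arr]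
  have hvals : (PySem.Dict.counter arr).values
      = (PySem.Set.ofList arr).map (fun k => ((List.count k arr : Int))) := by
    rw [PySem.Dict.values_eq_map_keys _ (PySem.Dict.nodup_keys_counter arr) 0]
    rw [PySem.Dict.keys_counter]
    exact List.map_congr_left (fun k _ => PySem.Dict.getD_counter arr k)
  rw [hvals, PySem.Dict.foldl_insert_getD_add_one_eq_counter]
  rw [pvGoA_eq_fold, zero_add]
  simp only [PySem.Dict.getD_counter, pvInner]
  rw [← pvFold_flatMap]
  -- abbreviations
  set n : Int := (arr.length : Int) with hn
  set V : List Int := (PySem.Set.ofList arr).map (fun k => ((List.count k arr : Int))) with hV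
  set S : List Int :=
    PySem.List.sorted (PySem.Set.ofList arr) (fun x => -((List.count x arr : Int))) false with hS
  set E : List Int :=
    (PySem.List.pyRange n 0 (-1)).flatMap (fun f => List.replicate (List.count f V) f) with hE
  set M : List Int := S.map (fun x => ((List.count x arr : Int))) with hM
  -- the two frequency sequences are the same list
  have hrange_pw : (PySem.List.pyRange n 0 (-1)).Pairwise (· > ·) := by
    rw [PySem.List.pyRange_neg_one_eq_reverse]
    exact List.pairwise_reverse.mpr (PySem.List.pairwise_lt_pyRange_one _ _)
  have hrange_nd : (PySem.List.pyRange n 0 (-1)).Nodup :=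
    List.Pairwise.imp (fun h => ne_of_gt h) hrange_pw
  have hVmem : ∀ v ∈ V, 0 < v ∧ v ≤ n := by
    intro v hv
    rw [hV] at hv
    obtain ⟨k, hk, rfl⟩ := List.mem_map.mp hv
    have hk' : k ∈ arr := (PySem.Set.mem_ofList arr k).mp hk
    constructor
    · exact_mod_cast List.count_pos_iff.mpr hk'
    · rw [hn]; exact_mod_cast List.count_le_length (l := arr) (a := k)
  have hEperm : E.Perm V := by
    rw [hE]
    refine List.perm_iff_count.mpr (fun x => ?_)
    rw [pvCount_flatMap_replicate _ _ hrange_nd]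
    by_cases hx : x ∈ PySem.List.pyRange n 0 (-1)
    · rw [if_pos hx]
    · rw [if_neg hx]
      refine (List.count_eq_zero.mpr (fun hxV => hx ?_)).symm
      have := hVmem x hxV
      exact PySem.List.mem_pyRange_neg_one.mpr ⟨this.1, this.2⟩
  have hEpw : E.Pairwise (· ≥ ·) := pvPairwise_flatMap_replicate _ _ hrange_pw
  have hMperm : M.Perm V := by
    rw [hM, hV]
    exact (PySem.List.sorted_perm _ _ _).map _
  have hMpw : M.Pairwise (· ≥ ·) := by
    rw [hM]
    refine List.pairwise_map.mpr ?_
    refine List.Pairwise.imp ?_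
      (PySem.List.sorted_pairwise (PySem.Set.ofList arr) (fun x => -((List.count x arr : Int))))
    intro a b hab
    omega
  haveI : Std.Antisymm (fun (a b : Int) => a ≥ b) := ⟨fun _ _ h1 h2 => le_antisymm h2 h1⟩
  have hME : M = E := (hMperm.trans hEperm.symm).eq_of_pairwise' hMpw hEpw
  rw [← hME]
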